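-- pv_equiv track=rewrite | github.com/dodona-edu/feedback-prediction | src/stats/stats_predictions.py | predictions_within_k_lines
-- ===== SOURCE A (Python) =====
-- from typing import List, Set, Tuple
--
-- def predictions_within_k_lines(results_per_submission: List[List[Tuple[int, List[int], List[int]]]], k):
--     result = []
--     for submission in results_per_submission:
--         max_line = submission[-1][0]
--         res = [([], []) for _ in range(max_line + 1)]
--         for line, annotations, predictions in submission:
--             res[line][0].extend(annotations)
--             if predictions:
--                 start = max(0, line - k)
--                 stop = min(max_line + 1, line + k)
--                 for i in range(start, stop):
--                     res[i][1].extend(predictions)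
--
--         result.extend(res)
--
--     return result
-- ===== SOURCE B (Python) =====
-- def predictions_within_k_lines(results_per_submission, k):
--     result = []
--     for submission in results_per_submission:
--         max_line = submission[-1][0]
--         anns = [[] for _ in range(max_line + 1)]
--         for line, annotations, _ in submission:
--             anns[line].extend(annotations)
--         for i in range(max_line + 1):
--             window = [p for line, _, predictions in submission
--                         if i - k < line <= i + k
--                         for p in predictions]
--             result.append((anns[i], window))
--     return result
-- ===== Notes on version B (the rewrite author's own statement) =====
-- stated objective: alternative
-- what changed: A scatters each entry's predictions into a mutable per-line table by looping over its +/-k window in place; B fills an annotations table in one pass and then builds each output row directly, gathering the predictions for position i by one comprehension over the submission (window test i-k < line <= i+k), so the nested range-loop over windows and the row-tuple mutation disappear.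
import Mathlib
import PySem

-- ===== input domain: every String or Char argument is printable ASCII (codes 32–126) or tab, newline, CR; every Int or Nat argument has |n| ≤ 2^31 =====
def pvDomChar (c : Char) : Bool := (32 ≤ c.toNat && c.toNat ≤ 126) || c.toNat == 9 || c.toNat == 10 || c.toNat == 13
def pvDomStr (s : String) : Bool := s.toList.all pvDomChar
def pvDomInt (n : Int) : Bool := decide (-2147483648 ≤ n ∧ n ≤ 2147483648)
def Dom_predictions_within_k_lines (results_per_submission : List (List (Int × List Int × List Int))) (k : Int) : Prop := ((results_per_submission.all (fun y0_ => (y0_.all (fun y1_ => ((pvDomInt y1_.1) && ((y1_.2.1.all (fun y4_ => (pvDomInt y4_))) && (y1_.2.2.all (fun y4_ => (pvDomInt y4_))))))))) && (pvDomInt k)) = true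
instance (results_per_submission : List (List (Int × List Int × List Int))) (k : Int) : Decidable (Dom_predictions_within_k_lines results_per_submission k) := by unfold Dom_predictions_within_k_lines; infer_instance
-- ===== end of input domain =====

-- B replaces A's window-scatter into a mutable row-tuple table by a one-pass annotations
-- table plus a direct per-position gather of the predictions (same value; no speed claim).

-- ===== PORT A =====

-- Python index normalisation: negative i counts from the end of a list of length len
def pvIndex (len : Nat) (i : Int) : Int := if i < 0 then i + len else i

-- res[i] = f(res[i]) with Python index semantics; out-of-range i raises IndexError in Python
-- (excluded by Pre_), here it leaves the list unchanged.
def pvModify (xs : List (List Int × List Int)) (i : Int)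
    (f : (List Int × List Int) → (List Int × List Int)) : List (List Int × List Int) :=
  if 0 ≤ pvIndex xs.length i ∧ pvIndex xs.length i < (xs.length : Int)
  then xs.modify (pvIndex xs.length i).toNat f else xs

-- the body of A's inner `for line, annotations, predictions in submission` loop
def pvSpread (k ml : Int) (res : List (List Int × List Int))
    (e : Int × List Int × List Int) : List (List Int × List Int) :=
  if e.2.2 = [] then pvModify res e.1 (fun q => (q.1 ++ e.2.1, q.2))
  else
    (PySem.List.pyRange (max 0 (e.1 - k)) (min (ml + 1) (e.1 + k))).foldl
      (fun r i => pvModify r i (fun q => (q.1, q.2 ++ e.2.2)))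
      (pvModify res e.1 (fun q => (q.1 ++ e.2.1, q.2)))

def predictions_within_k_lines (results_per_submission : List (List (Int × List Int × List Int))) (k : Int) : List (List Int × List Int) :=
  results_per_submission.foldl (fun result submission =>
    match PySem.List.pyGet? submission (-1) with
    | none => result   -- Python: IndexError on empty submission (excluded by Pre_)
    | some last =>
      let max_line := last.1
      let res := List.replicate (max_line + 1).toNat (([] : List Int), ([] : List Int))
      result ++ submission.foldl (pvSpread k max_line) res) []

-- ===== PORT B =====

-- anns[i].extend(xs) with Python index semantics (same IndexError rule as pvModify)
def pvModifyL (xs : List (List Int)) (i : Int) (f : List Int → List Int) : List (List Int) :=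
  if 0 ≤ pvIndex xs.length i ∧ pvIndex xs.length i < (xs.length : Int)
  then xs.modify (pvIndex xs.length i).toNat f else xs

-- B's window comprehension for output position i, in submission order
def pvWindow (submission : List (Int × List Int × List Int)) (k i : Int) : List Int :=
  submission.flatMap (fun e => if i - k < e.1 ∧ e.1 ≤ i + k then e.2.2 else [])

def predictions_within_k_lines_alt (results_per_submission : List (List (Int × List Int × List Int))) (k : Int) : List (List Int × List Int) :=
  results_per_submission.foldl (fun result submission =>
    match PySem.List.pyGet? submission (-1) with
    | none => result   -- Python: IndexError on empty submission (excluded by Pre_)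
    | some last =>
      let anns := submission.foldl
        (fun a e => pvModifyL a e.1 (fun q => q ++ e.2.1))
        (List.replicate (last.1 + 1).toNat ([] : List Int))
      result ++ (PySem.List.pyRange 0 (last.1 + 1)).map
        (fun i => ((PySem.List.pyGet? anns i).getD [], pvWindow submission k i))) []

-- ===== PRECONDITION & SPEC =====

-- Pre_ = exactly the inputs on which Python A returns: every submission nonempty, its last
-- line number nonnegative, and every line within Python's index range [-(max_line+1), max_line].
def Pre_predictions_within_k_lines (results_per_submission : List (List (Int × List Int × List Int))) (k : Int) : Prop :=
  ∀ sub ∈ results_per_submission, sub ≠ [] ∧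
    0 ≤ (sub.getLastD (0, [], [])).1 ∧
    ∀ e ∈ sub, -((sub.getLastD (0, [], [])).1 + 1) ≤ e.1 ∧ e.1 ≤ (sub.getLastD (0, [], [])).1

instance (results_per_submission : List (List (Int × List Int × List Int))) (k : Int) : Decidable (Pre_predictions_within_k_lines results_per_submission k) := by unfold Pre_predictions_within_k_lines; infer_instance

def pvWitness_predictions_within_k_lines : (List (List (Int × List Int × List Int))) × Int :=
  ([[(0, [7], [1]), (2, [], [3, 4])]], 1)

def Spec_predictions_within_k_lines (results_per_submission : List (List (Int × List Int × List Int))) (k : Int) (out : List (List Int × List Int)) : Prop := out = predictions_within_k_lines_alt results_per_submission k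
instance (results_per_submission : List (List (Int × List Int × List Int))) (k : Int) (out : List (List Int × List Int)) : Decidable (Spec_predictions_within_k_lines results_per_submission k out) := by unfold Spec_predictions_within_k_lines; infer_instance

-- ===== CLAIM (what is proved, stated in full; the proofs are below) =====

def Claim_equal_predictions_within_k_lines : Prop := ∀ (results_per_submission : List (List (Int × List Int × List Int))) (k : Int), Dom_predictions_within_k_lines results_per_submission k → Pre_predictions_within_k_lines results_per_submission k → Spec_predictions_within_k_lines results_per_submission k (predictions_within_k_lines results_per_submission k)

-- ===== LEMMAS AND PROOFS =====

-- proof-side characterisation of one output row: (annotations of the entries whose index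
-- wraps to j, window predictions for j), both in submission order
def pvGather (ml : Int) (submission : List (Int × List Int × List Int)) (k i : Int) : List Int × List Int :=
  (submission.flatMap (fun e => if PySem.Int.mod e.1 (ml + 1) = i then e.2.1 else []),
   pvWindow submission k i)

theorem pvModify_length (xs : List (List Int × List Int)) (i : Int)
    (f : (List Int × List Int) → (List Int × List Int)) :
    (pvModify xs i f).length = xs.length := by
  unfold pvModify; split <;> simp

theorem pvModify_getElem? (xs : List (List Int × List Int)) (i : Int)
    (f : (List Int × List Int) → (List Int × List Int)) (j : Nat) :
    (pvModify xs i f)[j]? =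
      if pvIndex xs.length i = (j : Int) then xs[j]?.map f else xs[j]? := by
  unfold pvModify
  by_cases h : 0 ≤ pvIndex xs.length i ∧ pvIndex xs.length i < (xs.length : Int)
  · rw [if_pos h, List.getElem?_modify]
    by_cases hj : pvIndex xs.length i = (j : Int)
    · have ht : (pvIndex xs.length i).toNat = j := by omega
      cases hx : xs[j]? <;> simp [hj, ht, hx]
    · have ht : (pvIndex xs.length i).toNat ≠ j := by omega
      cases hx : xs[j]? <;> simp [hj, ht, hx]
  · rw [if_neg h]
    by_cases hj : pvIndex xs.length i = (j : Int)
    · have hnone : xs[j]? = none := by apply List.getElem?_eq_none; omega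
      simp [hj, hnone]
    · simp [hj]

theorem pvModifyL_length (xs : List (List Int)) (i : Int) (f : List Int → List Int) :
    (pvModifyL xs i f).length = xs.length := by
  unfold pvModifyL; split <;> simp

theorem pvModifyL_getElem? (xs : List (List Int)) (i : Int) (f : List Int → List Int) (j : Nat) :
    (pvModifyL xs i f)[j]? =
      if pvIndex xs.length i = (j : Int) then xs[j]?.map f else xs[j]? := by
  unfold pvModifyL
  by_cases h : 0 ≤ pvIndex xs.length i ∧ pvIndex xs.length i < (xs.length : Int)
  · rw [if_pos h, List.getElem?_modify]
    by_cases hj : pvIndex xs.length i = (j : Int)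
    · have ht : (pvIndex xs.length i).toNat = j := by omega
      cases hx : xs[j]? <;> simp [hj, ht, hx]
    · have ht : (pvIndex xs.length i).toNat ≠ j := by omega
      cases hx : xs[j]? <;> simp [hj, ht, hx]
  · rw [if_neg h]
    by_cases hj : pvIndex xs.length i = (j : Int)
    · have hnone : xs[j]? = none := by apply List.getElem?_eq_none; omega
      simp [hj, hnone]
    · simp [hj]

-- within [0, len), Python's index normalisation is the divisor-signed modulus
theorem pvIndex_eq_mod (len : Nat) (i : Int) (h0 : 0 < (len : Int))
    (hlo : -(len : Int) ≤ i) (hhi : i < (len : Int)) :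
    pvIndex len i = PySem.Int.mod i (len : Int) := by
  rw [PySem.Int.mod_eq_emod_of_pos h0]
  unfold pvIndex
  split
  · have h2 : (i + (len : Int) * 1) % (len : Int) = i % (len : Int) :=
      Int.add_mul_emod_self_left ..
    have h3 : (i + (len : Int) * 1) % (len : Int) = i + (len : Int) * 1 :=
      Int.emod_eq_of_lt (by omega) (by omega)
    omega
  · rw [Int.emod_eq_of_lt (by omega) (by omega)]

theorem pvFoldRange_getElem? (p : List Int) (b : Int) :
    ∀ (a : Int), 0 ≤ a →
    ∀ (res : List (List Int × List Int)) (j : Nat),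
    ((PySem.List.pyRange a b).foldl
        (fun r i => pvModify r i (fun q => (q.1, q.2 ++ p))) res)[j]? =
      if a ≤ (j : Int) ∧ (j : Int) < b
      then res[j]?.map (fun q => (q.1, q.2 ++ p)) else res[j]? := by
  intro a
  induction hfuel : (b - a).toNat generalizing a with
  | zero =>
    intro ha res j
    rw [PySem.List.pyRange_one_eq_nil (by omega)]
    have h2 : ¬ (a ≤ (j : Int) ∧ (j : Int) < b) := by omega
    rw [List.foldl_nil, if_neg h2]
  | succ m ih =>
    intro ha res j
    rw [PySem.List.pyRange_one_cons (by omega)]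
    rw [List.foldl_cons]
    rw [ih (a + 1) (by omega) (by omega)]
    rw [pvModify_getElem?]
    have hidx : pvIndex res.length a = a := by unfold pvIndex; omega
    rw [hidx]
    by_cases hj : a = (j : Int)
    · have h1 : ¬ (a + 1 ≤ (j : Int) ∧ (j : Int) < b) := by omega
      have h2 : a ≤ (j : Int) ∧ (j : Int) < b := by omega
      rw [if_neg h1, if_pos hj, if_pos h2]
    · by_cases h1 : a + 1 ≤ (j : Int) ∧ (j : Int) < b
      · have h2 : a ≤ (j : Int) ∧ (j : Int) < b := by omega
        rw [if_pos h1, if_neg hj, if_pos h2]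
      · have h2 : ¬ (a ≤ (j : Int) ∧ (j : Int) < b) := by omega
        rw [if_neg h1, if_neg hj, if_neg h2]

theorem pvFoldRange_length (p : List Int) (rng : List Int) :
    ∀ (res : List (List Int × List Int)),
    (rng.foldl (fun r i => pvModify r i (fun q => (q.1, q.2 ++ p))) res).length = res.length := by
  induction rng with
  | nil => intro res; rfl
  | cons x xs ih =>
    intro res
    rw [List.foldl_cons, ih, pvModify_length]

theorem pvSpread_length (k ml : Int) (res : List (List Int × List Int))
    (e : Int × List Int × List Int) :
    (pvSpread k ml res e).length = res.length := by
  unfold pvSpread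
  split
  · exact pvModify_length _ _ _
  · rw [pvFoldRange_length, pvModify_length]

-- one step of A's inner loop, seen pointwise, under the line bounds Pre_ gives
theorem pvSpread_getElem? (k ml : Int) (res : List (List Int × List Int))
    (e : Int × List Int × List Int) (j : Nat)
    (hlen : (res.length : Int) = ml + 1)
    (hlo : -(ml + 1) ≤ e.1) (hhi : e.1 ≤ ml) :
    (pvSpread k ml res e)[j]? =
      res[j]?.map (fun q =>
        (q.1 ++ (if PySem.Int.mod e.1 (ml + 1) = (j : Int) then e.2.1 else []),
         q.2 ++ (if (j : Int) - k < e.1 ∧ e.1 ≤ (j : Int) + k then e.2.2 else []))) := by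
  have hres1 : (pvModify res e.1 (fun q => (q.1 ++ e.2.1, q.2)))[j]? =
      res[j]?.map (fun q => (q.1 ++ (if PySem.Int.mod e.1 (ml + 1) = (j : Int) then e.2.1 else []), q.2)) := by
    rw [pvModify_getElem?]
    have hix : pvIndex res.length e.1 = PySem.Int.mod e.1 (ml + 1) := by
      rw [pvIndex_eq_mod res.length e.1 (by omega) (by omega) (by omega)]
      exact congrArg (PySem.Int.mod e.1) (by omega)
    rw [hix]
    by_cases h3 : PySem.Int.mod e.1 (ml + 1) = (j : Int) <;>
      cases hres : res[j]? <;> simp [h3]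
  unfold pvSpread
  by_cases hp : e.2.2 = []
  · rw [if_pos hp, hres1]
    cases hres : res[j]? <;> simp [hp]
  · rw [if_neg hp]
    rw [pvFoldRange_getElem? e.2.2 _ _ (by omega)]
    rw [hres1]
    by_cases hc : (j : Int) < ml + 1
    · by_cases hw : (j : Int) - k < e.1 ∧ e.1 ≤ (j : Int) + k
      · have hr : max 0 (e.1 - k) ≤ (j : Int) ∧ (j : Int) < min (ml + 1) (e.1 + k) := by omega
        rw [if_pos hr, if_pos hw]
        cases hres : res[j]? <;> simp
      · have hr : ¬ (max 0 (e.1 - k) ≤ (j : Int) ∧ (j : Int) < min (ml + 1) (e.1 + k)) := by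
          omega
        rw [if_neg hr, if_neg hw]
        cases res[j]? <;> simp
    · have hnone : res[j]? = none := by apply List.getElem?_eq_none; omega
      have hr : ¬ (max 0 (e.1 - k) ≤ (j : Int) ∧ (j : Int) < min (ml + 1) (e.1 + k)) := by omega
      rw [if_neg hr, hnone]
      split <;> rfl

-- A's inner fold, pointwise: each slot accumulates exactly the gathers of the entries seen so far
theorem pvFoldSpread_getElem? (k ml : Int) (sub : List (Int × List Int × List Int)) :
    ∀ (res : List (List Int × List Int)), (res.length : Int) = ml + 1 →
    (∀ e ∈ sub, -(ml + 1) ≤ e.1 ∧ e.1 ≤ ml) →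
    ∀ (j : Nat),
    (sub.foldl (pvSpread k ml) res)[j]? =
      res[j]?.map (fun q =>
        (q.1 ++ (pvGather ml sub k (j : Int)).1, q.2 ++ (pvGather ml sub k (j : Int)).2)) := by
  induction sub with
  | nil =>
    intro res _ _ j
    cases hres : res[j]? <;> simp [pvGather, pvWindow, hres]
  | cons e sub ih =>
    intro res hlen hsub j
    rw [List.foldl_cons]
    rw [ih (pvSpread k ml res e)
        (by rw [pvSpread_length]; exact hlen)
        (fun x hx => hsub x (List.mem_cons_of_mem _ hx)) j]
    obtain ⟨h1, h2⟩ := hsub e (List.mem_cons_self ..)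
    rw [pvSpread_getElem? k ml res e j hlen h1 h2]
    cases hres : res[j]? <;>
      simp [pvGather, pvWindow, List.flatMap_cons, List.append_assoc]

-- B's annotations fold, pointwise
theorem pvFoldAnns_getElem? (ml : Int) (sub : List (Int × List Int × List Int)) :
    ∀ (anns : List (List Int)), ((anns.length : Int) = ml + 1) →
    (∀ e ∈ sub, -(ml + 1) ≤ e.1 ∧ e.1 ≤ ml) →
    ∀ (j : Nat),
    (sub.foldl (fun a e => pvModifyL a e.1 (fun q => q ++ e.2.1)) anns)[j]? =
      anns[j]?.map (fun q =>
        q ++ sub.flatMap (fun e => if PySem.Int.mod e.1 (ml + 1) = (j : Int) then e.2.1 else [])) := by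
  induction sub with
  | nil =>
    intro anns _ _ j
    cases hres : anns[j]? <;> simp [hres]
  | cons e sub ih =>
    intro anns hlen hsub j
    rw [List.foldl_cons]
    rw [ih (pvModifyL anns e.1 (fun q => q ++ e.2.1))
        (by rw [pvModifyL_length]; exact hlen)
        (fun x hx => hsub x (List.mem_cons_of_mem _ hx)) j]
    rw [pvModifyL_getElem?]
    obtain ⟨h1, h2⟩ := hsub e (List.mem_cons_self ..)
    have hix : pvIndex anns.length e.1 = PySem.Int.mod e.1 (ml + 1) := by
      rw [pvIndex_eq_mod anns.length e.1 (by omega) (by omega) (by omega)]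
      exact congrArg (PySem.Int.mod e.1) (by omega)
    rw [hix]
    by_cases h3 : PySem.Int.mod e.1 (ml + 1) = (j : Int) <;>
      cases hres : anns[j]? <;> simp [h3, List.flatMap_cons, List.append_assoc]

-- per-submission block: A's scattered table equals B's gathered rows
theorem pvSubmission_block (k ml : Int) (sub : List (Int × List Int × List Int))
    (hml : 0 ≤ ml)
    (hsub : ∀ e ∈ sub, -(ml + 1) ≤ e.1 ∧ e.1 ≤ ml) :
    sub.foldl (pvSpread k ml) (List.replicate (ml + 1).toNat (([] : List Int), ([] : List Int))) =
      (PySem.List.pyRange 0 (ml + 1)).map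
        (fun i => ((PySem.List.pyGet?
            (sub.foldl (fun a e => pvModifyL a e.1 (fun q => q ++ e.2.1))
              (List.replicate (ml + 1).toNat ([] : List Int))) i).getD [],
          pvWindow sub k i)) := by
  apply List.ext_getElem?
  intro j
  rw [pvFoldSpread_getElem? k ml sub _ (by simp; omega) hsub j]
  rw [List.getElem?_map, PySem.List.getElem?_pyRange_one]
  by_cases hj : j < (ml + 1).toNat
  · have hrep : (List.replicate (ml + 1).toNat (([] : List Int), ([] : List Int)))[j]? =
        some ([], []) := by rw [List.getElem?_replicate]; simp [hj]
    have hj' : j < (ml + 1 - 0).toNat := by omega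
    rw [hrep, if_pos hj']
    have hanns := pvFoldAnns_getElem? ml sub
      (List.replicate (ml + 1).toNat ([] : List Int)) (by simp; omega) hsub j
    have hrepL : (List.replicate (ml + 1).toNat ([] : List Int))[j]? = some [] := by
      rw [List.getElem?_replicate]; simp [hj]
    rw [hrepL] at hanns
    simp only [Option.map_some]
    have hcast : (0 : Int) + (j : Int) = ((j : Nat) : Int) := by omega
    rw [hcast, PySem.List.pyGet?_natCast, hanns]
    simp [pvGather]
  · have hrep : (List.replicate (ml + 1).toNat (([] : List Int), ([] : List Int)))[j]? = none := by
      rw [List.getElem?_replicate]; simp [hj]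
    have hj' : ¬ j < (ml + 1 - 0).toNat := by omega
    rw [hrep, if_neg hj']
    rfl

-- ===== VERDICT (by name: the statement is the Claim_ definition above) =====

theorem predictions_within_k_lines_spec : Claim_equal_predictions_within_k_lines := by
  intro rps k _ hpre
  show predictions_within_k_lines rps k = predictions_within_k_lines_alt rps k
  unfold predictions_within_k_lines predictions_within_k_lines_alt
  apply PySem.List.foldl_congr_mem
  intro acc sub hmem
  obtain ⟨hne, hml, hb⟩ := hpre sub hmem
  have hlast : sub.getLast? = some (sub.getLastD (0, [], [])) := by
    cases sub with
    | nil => exact absurd rfl hne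
    | cons x xs => simp [List.getLastD_eq_getLast?, List.getLast?_eq_some_getLast]
  rw [PySem.List.pyGet?_neg_one, hlast]
  simp only []
  congr 1
  exact pvSubmission_block _ _ _ hml hb
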